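-- pv_equiv track=rewrite | github.com/DaleStevenJohnson/AdventOfCode | py/aoc/year_2025/day_6.py | convert
-- ===== SOURCE A (Python) =====
-- def convert(lines: list[str]) -> list[list[int]]:
--     """
--     Position of the numbers is important in Cephalopod number system, so we expect a
--     string full of whitespace and numbers rather than cold hard ints.
--     """
--     position = max([len(x) for x in lines]) - 1
--     results: list[list[int]] = []
--     column: list[int] = []
--
--     # Work backwards through the positions
--     while position >= 0:
--         new_number = ""
--
--         for number in lines:
--             try:
--                 new_number += number[position].replace(" ", "")
--             except IndexError:
--                 # It's unlikely this will ever be hit, but hey ho!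
--                 continue
--
--         # Each operation is separated by a column of whitespace
--         if new_number != "":
--             column.append(int(new_number))
--
--         # We can detect that whitespace to know when we have moved on to a new column
--         if new_number == "" or position == 0:
--             results.append(column.copy())
--             column = []
--
--         position -= 1
--
--     # We are reading right to left, but appending columns left to right, so we need to reverse before returning
--     results.reverse()
--     return results
-- ===== SOURCE B (Python) =====
-- def convert(lines: list[str]) -> list[list[int]]:
--     """Row-major rewrite: transpose the grid into per-column digit strings with one
--     left-to-right pass over the rows, then split those columns into groups left to
--     right (building each group with insert(0); no reversed scan, no final reverse).
--     A's single flush at position 0 corresponds to dropping the leading empty group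
--     when the leftmost column is blank."""
--     width = max(len(line) for line in lines)
--     if width == 0:
--         return []
--     cols = [""] * width
--     for row in lines:
--         for i, ch in enumerate(row):
--             if ch != " ":
--                 cols[i] += ch
--     groups: list[list[int]] = [[]]
--     for s in cols:
--         if s:
--             groups[-1].insert(0, int(s))
--         else:
--             groups.append([])
--     return groups[1:] if cols[0] == "" else groups
-- ===== Notes on version B (the rewrite author's own statement) =====
-- stated objective: alternative
-- what changed: A scans columns right-to-left (char-by-char with try/except), parsing and flushing groups as it goes and reversing the result; B instead transposes the grid row-major in one pass over the lines (accumulating each character into per-column string buckets), then splits the column list on blank columns left-to-right, building each group with insert(0), with no reversed scan and no final reverse.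
import Mathlib
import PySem

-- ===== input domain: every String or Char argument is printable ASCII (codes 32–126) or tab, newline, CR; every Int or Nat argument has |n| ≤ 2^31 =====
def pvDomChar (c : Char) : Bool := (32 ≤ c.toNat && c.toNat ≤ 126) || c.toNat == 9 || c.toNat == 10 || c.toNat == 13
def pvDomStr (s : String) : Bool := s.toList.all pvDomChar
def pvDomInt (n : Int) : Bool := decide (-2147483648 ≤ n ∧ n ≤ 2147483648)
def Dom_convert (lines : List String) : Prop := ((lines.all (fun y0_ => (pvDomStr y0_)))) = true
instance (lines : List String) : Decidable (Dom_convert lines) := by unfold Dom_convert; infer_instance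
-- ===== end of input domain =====

-- B replaces A's right-to-left column scan (try/except per character, flush bookkeeping,
-- final reverse) by a row-major transpose into per-column strings followed by a
-- left-to-right split-on-blank grouping; objective: alternative decomposition, same cost.

-- ===== PORT A =====
-- new_number accumulated over lines: number[position] (IndexError → continue), .replace(" ", "")
-- on the one-char string is exactly 'if c = ' ' then [] else [c]'.
def colA (ls : List (List Char)) (pos : Int) : List Char :=
  ls.foldl (fun acc l =>
    match PySem.List.pyGet? l pos with
    | some c => acc ++ (if c = ' ' then [] else [c])
    | none => acc) []

-- the while-loop; fuel n+1 means position = n; returns none where int() raises ValueError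
def loopA (ls : List (List Char)) : Nat → List (List Int) → List Int → Option (List (List Int))
  | 0, results, _ => some results
  | n + 1, results, column =>
    let s := colA ls (n : Int)
    if s = [] then
      loopA ls n (results ++ [column]) []
    else
      match PySem.Int.ofChars? s with
      | none => none
      | some v =>
        if n = 0 then loopA ls n (results ++ [column ++ [v]]) []
        else loopA ls n results (column ++ [v])

def convert (lines : List String) : List (List Int) :=
  match PySem.List.max? (lines.map PySem.Str.len) (fun x => x) with
  | none => []   -- max() of an empty sequence raises ValueError: excluded by Pre_
  | some m =>
    match loopA (lines.map String.toList) m.toNat [] [] with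
    | none => []   -- int() raised ValueError: excluded by Pre_
    | some results => results.reverse

-- ===== PORT B =====
-- inner 'for i, ch in enumerate(row): if ch != " ": cols[i] += ch', index carried explicitly
def stepRow : List (List Char) → Nat → List Char → List (List Char)
  | cols, _, [] => cols
  | cols, i, c :: rest =>
    stepRow (if c ≠ ' ' then cols.modify i (fun s => s ++ [c]) else cols) (i + 1) rest

-- cols = [""] * width; for row in lines: (inner loop)
def buildCols (ls : List (List Char)) (width : Nat) : List (List Char) :=
  ls.foldl (fun cols row => stepRow cols 0 row) (List.replicate width [])

-- groups = [[]]; for s in cols: …  — the Python list 'groups' is kept as done ++ [cur],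
-- where cur is its mutable last element; groups[-1].insert(0, v) prepends v to cur;
-- none where int() raises ValueError
def groupB2 : List (List Char) → List (List Int) → List Int → Option (List (List Int) × List Int)
  | [], done, cur => some (done, cur)
  | s :: rest, done, cur =>
    if s = [] then groupB2 rest (done ++ [cur]) []
    else
      match PySem.Int.ofChars? s with
      | none => none
      | some v => groupB2 rest done (v :: cur)

def convert_alt (lines : List String) : List (List Int) :=
  match PySem.List.max? (lines.map PySem.Str.len) (fun x => x) with
  | none => []   -- max() of an empty sequence raises ValueError: excluded by Pre_
  | some m =>
    if m = 0 then []
    else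
      let cols := buildCols (lines.map String.toList) m.toNat
      match groupB2 cols [] [] with
      | none => []   -- int() raised ValueError: excluded by Pre_
      | some dc =>
        let gs := dc.1 ++ [dc.2]
        -- cols[0]: in range, width > 0 here
        if cols.headI = [] then gs.drop 1 else gs

-- ===== PRECONDITION & SPEC =====
-- spec-level description of one column string (used only by Pre_ and the proofs)
def colB (ls : List (List Char)) (pos : Int) : List Char :=
  (ls.filterMap (fun l => PySem.List.pyGet? l pos)).filter (fun c => c ≠ ' ')

-- Pre_ excludes exactly the inputs where A raises: the empty list (ValueError from max) and
-- grids where some non-empty column string is not parseable by int() (ValueError).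
def Pre_convert (lines : List String) : Prop :=
  lines ≠ [] ∧
  ∀ p : Nat, p < ((PySem.List.max? (lines.map PySem.Str.len) (fun x => x)).getD 0).toNat →
    (colB (lines.map String.toList) (p : Int) = [] ∨
     (PySem.Int.ofChars? (colB (lines.map String.toList) (p : Int))).isSome)
instance (lines : List String) : Decidable (Pre_convert lines) := by unfold Pre_convert; infer_instance

def pvWitness_convert : List String := ["1 2", "3 4"]

def Spec_convert (lines : List String) (out : List (List Int)) : Prop := out = convert_alt lines
instance (lines : List String) (out : List (List Int)) : Decidable (Spec_convert lines out) := by unfold Spec_convert; infer_instance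

-- ===== CLAIM (what is proved, stated in full; the proofs are below) =====
def Claim_equal_convert : Prop := ∀ (lines : List String), Dom_convert lines → Pre_convert lines → Spec_convert lines (convert lines)

-- ===== LEMMAS AND PROOFS =====

lemma loopA_step (ls : List (List Char)) (n : Nat) (res : List (List Int)) (col : List Int) :
    loopA ls (n + 1) res col =
      if colA ls (n : Int) = [] then loopA ls n (res ++ [col]) []
      else
        match PySem.Int.ofChars? (colA ls (n : Int)) with
        | none => none
        | some v =>
          if n = 0 then loopA ls n (res ++ [col ++ [v]]) [] else loopA ls n res (col ++ [v]) := rfl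

lemma colA_eq_colB (ls : List (List Char)) (pos : Int) : colA ls pos = colB ls pos := by
  suffices h : ∀ acc, ls.foldl (fun acc l =>
      match PySem.List.pyGet? l pos with
      | some c => acc ++ (if c = ' ' then [] else [c])
      | none => acc) acc = acc ++ (ls.filterMap (fun l => PySem.List.pyGet? l pos)).filter (fun c => c ≠ ' ') by
    simpa [colA, colB] using h []
  induction ls with
  | nil => simp
  | cons l t ih =>
    intro acc
    cases h : PySem.List.pyGet? l pos with
    | none => simp [h, ih]
    | some c =>
      by_cases hc : c = ' ' <;> simp [h, hc, ih]

-- R-to-L grouping used only to characterise A's loop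
def groupA : List (List Char) → List (List Int) → List Int → Option (List (List Int) × List Int)
  | [], results, group => some (results, group)
  | s :: rest, results, group =>
    if s = [] then groupA rest (results ++ [group]) []
    else
      match PySem.Int.ofChars? s with
      | none => none
      | some v => groupA rest results (group ++ [v])

-- the column strings of positions n-1, …, 0 in A's scan order
def colsN (ls : List (List Char)) (n : Nat) : List (List Char) :=
  ((List.range n).reverse).map (fun p : Nat => colA ls (p : Int))

lemma colsN_succ (ls : List (List Char)) (n : Nat) :
    colsN ls (n + 1) = colA ls (n : Int) :: colsN ls n := by
  simp [colsN, List.range_succ]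

lemma loopA_eq (ls : List (List Char)) (n : Nat) :
    ∀ res col, (∀ p : Nat, p < n → (colA ls (p : Int) = [] ∨ (PySem.Int.ofChars? (colA ls (p : Int))).isSome)) →
    ∃ r g, groupA (colsN ls n) res col = some (r, g) ∧
      loopA ls n res col = some (if n = 0 then r else if colA ls (0 : Int) = [] then r else r ++ [g]) := by
  induction n with
  | zero => intro res col _; exact ⟨res, col, rfl, rfl⟩
  | succ n ih =>
    intro res col hok
    rw [colsN_succ]
    show ∃ r g, groupA _ _ _ = _ ∧ _
    rw [loopA_step]
    by_cases hs : colA ls (n : Int) = []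
    · rw [if_pos hs]
      have hg : groupA (colA ls (n : Int) :: colsN ls n) res col = groupA (colsN ls n) (res ++ [col]) [] := by
        simp [groupA, hs]
      rw [hg]
      cases n with
      | zero =>
        rw [Nat.cast_zero] at hs
        exact ⟨res ++ [col], [], rfl, by simp [loopA, hs]⟩
      | succ k =>
        obtain ⟨r, g, hg2, hl⟩ := ih (res ++ [col]) [] (fun p hp => hok p (by omega))
        exact ⟨r, g, hg2, by simpa using hl⟩
    · rw [if_neg hs]
      obtain ⟨v, hv⟩ := Option.isSome_iff_exists.mp ((hok n (by omega)).resolve_left hs)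
      rw [hv]
      have hg : groupA (colA ls (n : Int) :: colsN ls n) res col = groupA (colsN ls n) res (col ++ [v]) := by
        simp [groupA, hs, hv]
      rw [hg]
      cases n with
      | zero =>
        rw [Nat.cast_zero] at hs
        exact ⟨res, col ++ [v], rfl, by simp [loopA, hs]⟩
      | succ k =>
        obtain ⟨r, g, hg2, hl⟩ := ih res (col ++ [v]) (fun p hp => hok p (by omega))
        refine ⟨r, g, hg2, ?_⟩
        rw [if_neg (by omega)]
        simpa using hl

lemma groupA_append (xs ys : List (List Char)) :
    ∀ res col, groupA (xs ++ ys) res col =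
      match groupA xs res col with
      | none => none
      | some rg => groupA ys rg.1 rg.2 := by
  induction xs with
  | nil => intro res col; rfl
  | cons s rest ih =>
    intro res col
    by_cases hs : s = []
    · simp [groupA, hs, ih]
    · cases hv : PySem.Int.ofChars? s with
      | none => simp [groupA, hs, hv]
      | some v => simp [groupA, hs, hv, ih]

-- how groupB2's result from an arbitrary state is read off its result from the empty state
def mergeD (d : List (List Int)) (cur : List Int) : List (List Int) :=
  match d with
  | [] => []
  | d0 :: dr => (d0 ++ cur) :: dr

def mergeC (d : List (List Int)) (c cur : List Int) : List Int :=
  match d with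
  | [] => c ++ cur
  | _ :: _ => c

lemma groupB2_general (cs : List (List Char)) :
    ∀ done cur,
      groupB2 cs done cur =
        match groupB2 cs [] [] with
        | none => none
        | some dc => some (done ++ mergeD dc.1 cur, mergeC dc.1 dc.2 cur) := by
  induction cs with
  | nil => intro done cur; simp [groupB2, mergeD, mergeC]
  | cons s rest ih =>
    intro done cur
    by_cases hs : s = []
    · rw [show groupB2 (s :: rest) done cur = groupB2 rest (done ++ [cur]) [] by simp [groupB2, hs],
          show groupB2 (s :: rest) [] [] = groupB2 rest [[]] [] by simp [groupB2, hs],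
          ih (done ++ [cur]) [], ih [[]] []]
      cases h : groupB2 rest [] [] with
      | none => rfl
      | some dc => cases dc with | mk d c => cases d <;> simp [mergeD, mergeC]
    · cases hv : PySem.Int.ofChars? s with
      | none => simp [groupB2, hs, hv]
      | some v =>
        rw [show groupB2 (s :: rest) done cur = groupB2 rest done (v :: cur) by simp [groupB2, hs, hv],
            show groupB2 (s :: rest) [] [] = groupB2 rest [] [v] by simp [groupB2, hs, hv],
            ih done (v :: cur), ih [] [v]]
        cases h : groupB2 rest [] [] with
        | none => rfl
        | some dc => cases dc with | mk d c => cases d <;> simp [mergeD, mergeC]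

-- small list facts used to flip between the two scan directions
lemma pvDropLast_cons_concat {α : Type} (c : α) (l : List α) (x : α) :
    (c :: (l ++ [x])).dropLast = c :: l := by
  rw [← List.cons_append, List.dropLast_concat]

lemma pvGetLast_cons_concat {α : Type} (c : α) (l : List α) (x : α) :
    (c :: (l ++ [x])).getLast (by simp) = x := by
  have h1 : (c :: (l ++ [x])).getLast? = some x := by
    rw [← List.cons_append]; exact List.getLast?_concat
  rw [List.getLast?_eq_some_getLast (by simp)] at h1
  exact Option.some_injective _ h1

-- MAIN: B's left-to-right grouping versus A's right-to-left grouping of the reversed columns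
lemma groupB2_vs_groupA (cs : List (List Char))
    (hok : ∀ s ∈ cs, s = [] ∨ (PySem.Int.ofChars? s).isSome) :
    ∃ d c, groupB2 cs [] [] = some (d, c) ∧
      groupA cs.reverse [] [] = some ((c :: d.reverse).dropLast, (d ++ [c]).headI) := by
  induction cs with
  | nil => exact ⟨[], [], rfl, rfl⟩
  | cons s rest ih =>
    obtain ⟨d, c, hB, hA⟩ := ih (fun x hx => hok x (List.mem_cons_of_mem _ hx))
    have hrev : (s :: rest).reverse = rest.reverse ++ [s] := by simp
    by_cases hs : s = []
    · refine ⟨[] :: d, c, ?_, ?_⟩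
      · rw [show groupB2 (s :: rest) [] [] = groupB2 rest [[]] [] by simp [groupB2, hs],
            groupB2_general rest [[]] [], hB]
        cases d <;> simp [mergeD, mergeC]
      · rw [hrev, groupA_append, hA]
        simp only [groupA, if_pos hs]
        have hfirst : (c :: d.reverse).dropLast ++ [(d ++ [c]).headI] = (c :: ([] :: d).reverse).dropLast := by
          rw [List.reverse_cons, pvDropLast_cons_concat]
          have hg : (d ++ [c]).headI = (c :: d.reverse).getLast (by simp) := by
            cases d with
            | nil => rfl
            | cons d0 dr => rw [List.reverse_cons, pvGetLast_cons_concat]; rfl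
          rw [hg, List.dropLast_append_getLast]
        rw [hfirst]
        simp
    · obtain ⟨v, hv⟩ := Option.isSome_iff_exists.mp ((hok s (by simp)).resolve_left hs)
      refine ⟨mergeD d [v], mergeC d c [v], ?_, ?_⟩
      · rw [show groupB2 (s :: rest) [] [] = groupB2 rest [] [v] by simp [groupB2, hs, hv],
            groupB2_general rest [] [v], hB]
        simp
      · rw [hrev, groupA_append, hA]
        simp only [groupA, if_neg hs, hv]
        cases d with
        | nil => simp [mergeD, mergeC]
        | cons d0 dr =>
          simp only [mergeD, mergeC]
          rw [List.reverse_cons, List.reverse_cons, pvDropLast_cons_concat, pvDropLast_cons_concat]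
          simp

-- contribution of one row to column j
def rowContrib (row : List Char) (k : Nat) : List Char :=
  match row[k]? with
  | some ch => if ch = ' ' then [] else [ch]
  | none => []

lemma stepRow_getElem (row : List Char) :
    ∀ (cols : List (List Char)) (i j : Nat), (stepRow cols i row)[j]? =
      if j < i then cols[j]?
      else (cols[j]?).map (fun s => s ++ rowContrib row (j - i)) := by
  induction row with
  | nil =>
    intro cols i j
    show cols[j]? = _
    split
    · rfl
    · cases cols[j]? <;> simp [rowContrib]
  | cons ch rest ih =>
    intro cols i j
    show (stepRow (if ch ≠ ' ' then cols.modify i (fun s => s ++ [ch]) else cols) (i + 1) rest)[j]? = _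
    rw [ih]
    have hmod : (if ch ≠ ' ' then cols.modify i (fun s => s ++ [ch]) else cols)[j]? =
        if j = i ∧ ch ≠ ' ' then (cols[j]?).map (fun s => s ++ [ch]) else cols[j]? := by
      by_cases hc : ch = ' '
      · simp [hc]
      · rw [if_pos hc, List.getElem?_modify]
        by_cases hji : i = j
        · subst hji; cases cols[i]? <;> simp [hc]
        · cases cols[j]? <;> simp [hc, hji, Ne.symm hji]
    rw [hmod]
    rcases Nat.lt_trichotomy j i with hj | hj | hj
    · rw [if_pos (show j < i + 1 by omega), if_neg (show ¬(j = i ∧ ch ≠ ' ') from fun h => by omega),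
          if_pos hj]
    · subst hj
      rw [if_pos (show j < j + 1 by omega), if_neg (lt_irrefl j), Nat.sub_self]
      by_cases hc : ch = ' '
      · rw [if_neg (show ¬(j = j ∧ ch ≠ ' ') from fun h => h.2 hc)]
        cases cols[j]? <;> simp [rowContrib, hc]
      · rw [if_pos (show j = j ∧ ch ≠ ' ' from ⟨rfl, hc⟩)]
        cases cols[j]? <;> simp [rowContrib, hc]
    · rw [if_neg (show ¬ j < i + 1 by omega), if_neg (show ¬(j = i ∧ ch ≠ ' ') from fun h => by omega),
          if_neg (show ¬ j < i by omega)]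
      have hk : j - i = (j - (i + 1)) + 1 := by omega
      have hr : rowContrib (ch :: rest) (j - i) = rowContrib rest (j - (i + 1)) := by
        rw [rowContrib, hk, List.getElem?_cons_succ]; rfl
      rw [hr]

lemma foldl_stepRow_getElem (ls : List (List Char)) :
    ∀ (init : List (List Char)) (j : Nat),
      (ls.foldl (fun cols row => stepRow cols 0 row) init)[j]? =
        (init[j]?).map (fun s => s ++ ls.flatMap (fun row => rowContrib row j)) := by
  induction ls with
  | nil => intro init j; cases h : init[j]? <;> simp [h]
  | cons row rest ih =>
    intro init j
    show (rest.foldl _ (stepRow init 0 row))[j]? = _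
    rw [ih, stepRow_getElem]
    rw [if_neg (by omega)]
    cases h : init[j]? <;> simp [List.flatMap_cons]

lemma colB_cons (l : List Char) (t : List (List Char)) (pos : Int) :
    colB (l :: t) pos =
      (match PySem.List.pyGet? l pos with
       | some ch => if ch = ' ' then [] else [ch]
       | none => []) ++ colB t pos := by
  rw [colB, List.filterMap_cons]
  cases h : PySem.List.pyGet? l pos with
  | none => simp [colB]
  | some ch => by_cases hc : ch = ' ' <;> simp [colB, hc]

lemma colB_eq_flatMap (ls : List (List Char)) (j : Nat) :
    colB ls (j : Int) = ls.flatMap (fun row => rowContrib row j) := by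
  induction ls with
  | nil => simp [colB]
  | cons l t ih =>
    rw [colB_cons, List.flatMap_cons, ih]
    congr 1
    rw [show PySem.List.pyGet? l ((j : Nat) : Int) = l[j]? from PySem.List.pyGet?_natCast l j]
    rfl

lemma buildCols_eq_map (ls : List (List Char)) (width : Nat) :
    buildCols ls width = (List.range width).map (fun p : Nat => colB ls (p : Int)) := by
  apply List.ext_getElem?
  intro j
  rw [buildCols, foldl_stepRow_getElem]
  by_cases hj : j < width
  · have h1 : (List.replicate width ([] : List Char))[j]? = some [] := by
      rw [List.getElem?_replicate, if_pos hj]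
    have h2 : ((List.range width).map (fun p : Nat => colB ls (p : Int)))[j]? =
        some (colB ls ((j : Nat) : Int)) := by
      rw [List.getElem?_map, List.getElem?_range hj, Option.map_some]
    rw [h1, h2, Option.map_some, colB_eq_flatMap, List.nil_append]
  · have h1 : (List.replicate width ([] : List Char))[j]? = none := by
      rw [List.getElem?_replicate, if_neg hj]
    have h2 : ((List.range width).map (fun p : Nat => colB ls (p : Int)))[j]? = none := by
      rw [List.getElem?_map, List.getElem?_eq_none (by simpa using Nat.le_of_not_lt hj)]
      rfl
    rw [h1, h2, Option.map_none]

-- reversing a right-to-left-built result list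
lemma pvRevDrop {α : Type} (c : α) (d : List α) :
    ((c :: d.reverse).dropLast).reverse = (d ++ [c]).drop 1 := by
  cases d with
  | nil => simp
  | cons d0 dr => rw [List.reverse_cons, pvDropLast_cons_concat]; simp

lemma pvHeadCons {α : Type} [Inhabited α] (c : α) (d : List α) :
    (d ++ [c]).headI :: (d ++ [c]).drop 1 = d ++ [c] := by
  cases d <;> simp

-- ===== VERDICT (by name: the statement is the Claim_ definition above) =====
theorem convert_spec : Claim_equal_convert := by
  intro lines _ hpre
  obtain ⟨hne, hok⟩ := hpre
  obtain ⟨mi, hm⟩ : ∃ mi, PySem.List.max? (lines.map PySem.Str.len) (fun x => x) = some mi := by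
    cases h : PySem.List.max? (lines.map PySem.Str.len) (fun x => x) with
    | none => exact absurd ((PySem.List.max?_eq_none_iff _ _).mp h) (by simp [hne])
    | some mi => exact ⟨mi, rfl⟩
  have hm0 : 0 ≤ mi := by
    have hmem := PySem.List.max?_mem hm
    obtain ⟨s, _, rfl⟩ := List.mem_map.mp hmem
    simp [PySem.Str.len_eq]
  obtain ⟨n, rfl⟩ : ∃ n : Nat, mi = (n : Int) := ⟨mi.toNat, by omega⟩
  have htn : ((n : Int)).toNat = n := Int.toNat_natCast n
  have hok' : ∀ p : Nat, p < n →
      (colA (lines.map String.toList) (p : Int) = [] ∨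
       (PySem.Int.ofChars? (colA (lines.map String.toList) (p : Int))).isSome) := by
    intro p hp
    have h := hok p (by rw [hm]; simpa using hp)
    simpa [colA_eq_colB] using h
  obtain ⟨r, g, hg, hl⟩ := loopA_eq (lines.map String.toList) n [] [] hok'
  by_cases h0 : n = 0
  · subst h0
    simp only [colsN, List.range_zero, List.reverse_nil, List.map_nil, groupA] at hg
    cases hg
    simp [Spec_convert, convert, convert_alt, hm, hl]
  · have hcols := buildCols_eq_map (lines.map String.toList) n
    have hokc : ∀ s ∈ buildCols (lines.map String.toList) n,
        s = [] ∨ (PySem.Int.ofChars? s).isSome := by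
      rw [hcols]
      intro s hs
      obtain ⟨p, hp, rfl⟩ := List.mem_map.mp hs
      exact hok p (by rw [hm]; simpa using List.mem_range.mp hp)
    obtain ⟨d, c, hB2, hGA⟩ := groupB2_vs_groupA _ hokc
    have hrevcols : colsN (lines.map String.toList) n = (buildCols (lines.map String.toList) n).reverse := by
      rw [hcols, colsN, ← List.map_reverse]
      exact List.map_congr_left (fun p _ => colA_eq_colB _ _)
    rw [hrevcols, hGA] at hg
    obtain ⟨rfl, rfl⟩ : r = (c :: d.reverse).dropLast ∧ g = (d ++ [c]).headI := by
      cases hg; exact ⟨rfl, rfl⟩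
    obtain ⟨c0, ct, hc⟩ : ∃ c0 ct, buildCols (lines.map String.toList) n = c0 :: ct := by
      cases hbc : buildCols (lines.map String.toList) n with
      | nil =>
        rw [hbc] at hcols
        exact absurd hcols.symm (by simp [List.range_eq_nil, h0, List.map_eq_nil_iff])
      | cons c0 ct => exact ⟨c0, ct, rfl⟩
    have hc0 : c0 = colB (lines.map String.toList) (0 : Int) := by
      have h1 : (buildCols (lines.map String.toList) n)[0]? = some c0 := by rw [hc]; rfl
      rw [hcols] at h1
      have h2 : ((List.range n).map (fun p : Nat => colB (lines.map String.toList) (p : Int)))[0]?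
          = some (colB (lines.map String.toList) ((0 : Nat) : Int)) := by
        simp [Nat.pos_of_ne_zero h0]
      rw [h1] at h2
      exact (Option.some_injective _ h2).symm ▸ (by cases h2; rfl)
    have hA0 : colA (lines.map String.toList) (0 : Int) = c0 := by
      rw [colA_eq_colB, hc0]
    rw [hc] at hB2
    simp only [Spec_convert, convert, convert_alt, hm, htn, hl, if_neg h0,
      if_neg (show ¬ ((n : Int) = 0) by exact_mod_cast h0), hc, hB2, hA0]
    by_cases h00 : c0 = []
    · rw [if_pos h00, if_pos (show List.headI (c0 :: ct) = [] by simpa using h00)]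
      exact pvRevDrop c d
    · rw [if_neg h00, if_neg (show ¬ List.headI (c0 :: ct) = [] by simpa using h00)]
      rw [List.reverse_append, pvRevDrop]
      simpa using pvHeadCons c d
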